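-- pv_equiv track=rewrite | github.com/YunykVolodymyr/PythonOcten | lesson2/additional.py | generate_odd
-- ===== SOURCE A (Python) =====
-- def generate_odd(n: int):
--     l = range(1,n + 1, 2)
--     n = 1
--     res = []
--     temp = []
--     for i in l:
--         if len(temp) < n:
--             temp.append(i)
--         else:
--             n += 1
--             res.append(temp)
--             temp = [i]
--     res.append(temp)
--     return res
-- ===== SOURCE B (Python) =====
-- def generate_odd(n: int):
--     odds = list(range(1, n + 1, 2))
--     res = []
--     idx, size = 0, 1
--     while True:
--         res.append(odds[idx:idx + size])
--         if idx + size >= len(odds):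
--             break
--         idx += size
--         size += 1
--     return res
-- ===== Notes on version B (the rewrite author's own statement) =====
-- stated objective: simpler
-- what changed: Replaces A's element-by-element buffer with its n/res/temp bookkeeping by a triangular-slice loop: build the odds list once, then append slices odds[idx:idx+size] of growing size until the list is exhausted.
import Mathlib
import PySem

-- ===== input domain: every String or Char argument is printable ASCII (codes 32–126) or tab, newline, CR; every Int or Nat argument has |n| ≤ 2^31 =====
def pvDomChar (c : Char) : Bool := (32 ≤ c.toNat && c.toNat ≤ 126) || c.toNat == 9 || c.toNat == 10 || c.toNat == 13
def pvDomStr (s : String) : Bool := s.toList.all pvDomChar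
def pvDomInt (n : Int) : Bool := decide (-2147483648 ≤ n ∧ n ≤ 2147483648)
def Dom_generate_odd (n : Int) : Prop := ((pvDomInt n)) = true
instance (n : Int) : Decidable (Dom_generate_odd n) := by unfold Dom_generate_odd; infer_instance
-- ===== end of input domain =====

-- B replaces A's element-by-element buffer bookkeeping by a triangular-slice loop (objective: simpler).

-- ===== PORT A =====
-- one step of A's for-loop body, state = (n, res, temp)
def genOddStep (st : Int × List (List Int) × List Int) (i : Int) :
    Int × List (List Int) × List Int :=
  let (n, res, temp) := st
  if (temp.length : Int) < n then (n, res, temp ++ [i])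
  else (n + 1, res ++ [temp], [i])

def generate_odd (n : Int) : List (List Int) :=
  let l := PySem.List.pyRange 1 (n + 1) 2
  let st := l.foldl genOddStep (1, [], [])
  st.2.1 ++ [st.2.2]

-- ===== PORT B =====
-- the do-while loop of Source B: append odds[idx:idx+size]; stop when idx+size ≥ len(odds)
def genOddAltLoop (odds : List Int) (idx size : Nat) : List (List Int) :=
  let chunk := PySem.List.slice odds (some (idx : Int)) (some ((idx : Int) + (size : Int)))
  if idx + size ≥ odds.length then [chunk]
  else chunk :: genOddAltLoop odds (idx + size) (size + 1)
termination_by 2 * odds.length - (2 * idx + size)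
decreasing_by omega

def generate_odd_alt (n : Int) : List (List Int) :=
  let odds := PySem.List.pyRange 1 (n + 1) 2
  genOddAltLoop odds 0 1

-- ===== PRECONDITION & SPEC =====
def Spec_generate_odd (n : Int) (out : List (List Int)) : Prop := out = generate_odd_alt n
instance (n : Int) (out : List (List Int)) : Decidable (Spec_generate_odd n out) := by unfold Spec_generate_odd; infer_instance

-- ===== CLAIM (what is proved, stated in full; the proofs are below) =====
def Claim_equal_generate_odd : Prop := ∀ (n : Int), Dom_generate_odd n → Spec_generate_odd n (generate_odd n)

-- ===== LEMMAS AND PROOFS =====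

-- reference chunking: rows of sizes k, k+1, … of a list (last row possibly short or empty)
def chunkRef (l : List Int) (k : Nat) : List (List Int) :=
  if l.length ≤ k then [l]
  else l.take k :: chunkRef (l.drop k) (k + 1)
termination_by 2 * l.length - k
decreasing_by simp only [List.length_drop]; omega

theorem genOddAltLoop_eq_chunkRef (odds : List Int) :
    ∀ (m idx size : Nat), odds.length ≤ idx + m → 1 ≤ size →
      genOddAltLoop odds idx size = chunkRef (odds.drop idx) size := by
  intro m
  induction m with
  | zero =>
    intro idx size h1 h2
    unfold genOddAltLoop
    rw [if_pos (by omega), chunkRef.eq_def,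
      if_pos (by simp only [List.length_drop]; omega),
      PySem.List.slice_natCast_add,
      List.take_of_length_le (by simp only [List.length_drop]; omega)]
  | succ m ih =>
    intro idx size h1 h2
    unfold genOddAltLoop
    by_cases hstop : idx + size ≥ odds.length
    · rw [if_pos hstop, chunkRef.eq_def,
        if_pos (by simp only [List.length_drop]; omega),
        PySem.List.slice_natCast_add,
        List.take_of_length_le (by simp only [List.length_drop]; omega)]
    · rw [if_neg hstop, chunkRef.eq_def,
        if_neg (by simp only [List.length_drop]; omega),
        PySem.List.slice_natCast_add,
        ih (idx + size) (size + 1) (by omega) (by omega), List.drop_drop]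

theorem foldl_genOdd_eq (l : List Int) :
    ∀ (k : Nat) (res : List (List Int)) (temp : List Int),
      1 ≤ k → temp.length ≤ k →
      (let st := l.foldl genOddStep ((k : Int), res, temp)
       st.2.1 ++ [st.2.2]) = res ++ chunkRef (temp ++ l) k := by
  induction l with
  | nil =>
    intro k res temp hk hlen
    simp only [List.foldl_nil]
    rw [chunkRef.eq_def, if_pos (by simpa using hlen)]
    simp
  | cons i rest ih =>
    intro k res temp hk hlen
    simp only [List.foldl_cons, genOddStep]
    by_cases hlt : temp.length < k
    · rw [if_pos (by exact_mod_cast hlt)]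
      rw [ih k res (temp ++ [i]) hk (by simp only [List.length_append, List.length_cons, List.length_nil]; omega)]
      simp
    · rw [if_neg (by exact_mod_cast hlt)]
      have hEq : temp.length = k := le_antisymm hlen (not_lt.mp hlt)
      have hsplit : chunkRef (temp ++ i :: rest) k = temp :: chunkRef ([i] ++ rest) (k + 1) := by
        rw [chunkRef.eq_def, if_neg (by simp only [List.length_append, List.length_cons]; omega),
          ← hEq, List.take_left, List.drop_left, List.singleton_append]
      have hcast : ((k : Int)) + 1 = (((k + 1 : Nat)) : Int) := by push_cast; ring
      rw [hsplit, hcast, ih (k + 1) (res ++ [temp]) [i] (by omega) (by simp)]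
      simp

-- ===== VERDICT (by name: the statement is the Claim_ definition above) =====
theorem generate_odd_spec : Claim_equal_generate_odd := by
  intro n _
  show generate_odd n = generate_odd_alt n
  unfold generate_odd generate_odd_alt
  rw [genOddAltLoop_eq_chunkRef _ (PySem.List.pyRange 1 (n + 1) 2).length 0 1 (by omega) (by omega)]
  simpa using foldl_genOdd_eq (PySem.List.pyRange 1 (n + 1) 2) 1 [] [] (by omega) (by simp)
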